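-- pv_equiv track=rewrite | github.com/doshiro/2020-presidential-candidate-dataset | candidate-video-data/youtube_subs.py | filterPete
-- ===== SOURCE A (Python) =====
-- def filterPete(pete):
--     pete_split = pete.split()
--     filtered = []
--     start = False
--     i = 0
--     for word in pete_split:
--         if (word == 'BUTTIGIEG:'):
--             start = True
--             continue
--         if (start):
--             if (word != 'PETE:' and word != 'AUDIENCE:' and word != '[applause]'):
--                 filtered.append(word)
--                 i += 1
--                 if (i % 70 == 0):
--                     filtered.append('\n')
--     return ' '.join(filtered)
-- ===== SOURCE B (Python) =====
-- def filterPete(pete):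
--     words = pete.split()
--     try:
--         idx = words.index('BUTTIGIEG:')
--     except ValueError:
--         return ''
--     skip = {'BUTTIGIEG:', 'PETE:', 'AUDIENCE:', '[applause]'}
--     filtered = [w for w in words[idx + 1:] if w not in skip]
--     chunks = [filtered[i:i + 70] for i in range(0, len(filtered), 70)]
--     return ' \n '.join(' '.join(c) for c in chunks)
-- ===== Notes on version B (the rewrite author's own statement) =====
-- stated objective: simpler
-- what changed: Replaces A's single stateful scan (start flag, running word counter, per-word mod-70 test) with .index to locate the speaker tag, a set-based comprehension to filter, and joining the 70-word chunks with ' \n '.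
-- intended difference: When the number of kept words after the first 'BUTTIGIEG:' is a positive multiple of 70, A's i%70 bookkeeping appends a dangling '\n' element after the last word so A's output ends in an extra ' \n'; B returns the same text without that trailing ' \n', which is the value intended by breaking the text into 70-word lines. — e.g. on filterPete("BUTTIGIEG: a a a a a a a a a a a a a a a a a a a a a a a a a a a a a a a a a a a a a a a a a a a a a a a a a a a a a a…): A returns "a a a a a a a a a a a a a a a a a a a a a a a a a a a a a a a a a a a a a a a a a a a a a a a a a a a a a a a a a a a …, B returns "a a a a a a a a a a a a a a a a a a a a a a a a a a a a a a a a a a a a a a a a a a a a a a a a a a a a a a a a a a a …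
import Mathlib
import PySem

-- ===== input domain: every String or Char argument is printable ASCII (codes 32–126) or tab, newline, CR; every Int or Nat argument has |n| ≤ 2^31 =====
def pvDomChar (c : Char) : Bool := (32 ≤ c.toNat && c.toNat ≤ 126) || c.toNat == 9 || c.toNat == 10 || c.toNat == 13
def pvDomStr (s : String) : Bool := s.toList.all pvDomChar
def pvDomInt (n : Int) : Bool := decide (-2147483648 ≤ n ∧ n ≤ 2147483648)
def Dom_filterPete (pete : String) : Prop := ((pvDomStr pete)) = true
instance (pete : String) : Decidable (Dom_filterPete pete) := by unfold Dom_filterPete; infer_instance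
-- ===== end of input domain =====

-- B replaces A's single stateful scan (start flag, running counter, mod-70 test per word) by
-- .index to locate the speaker tag, a comprehension to filter, and joining the 70-word chunks
-- with ' \n ' (objective: simpler decomposition); B drops A's dangling trailing ' \n' when the
-- kept-word count is an exact positive multiple of 70 (the intended difference D_ below).

-- ===== PORT A =====
-- one step of A's loop; state = (filtered, start, i)
def stepA (acc : List String × Bool × Int) (word : String) : List String × Bool × Int :=
  let (filtered, start, i) := acc
  if word = "BUTTIGIEG:" then (filtered, true, i)
  else if start then
    if word ≠ "PETE:" ∧ word ≠ "AUDIENCE:" ∧ word ≠ "[applause]" then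
      let filtered' := filtered ++ [word]
      let i' := i + 1
      if PySem.Int.mod i' 70 = 0 then (filtered' ++ ["\n"], start, i')
      else (filtered', start, i')
    else (filtered, start, i)
  else (filtered, start, i)

def filterPete (pete : String) : String :=
  let r := (PySem.Str.split₀ pete).foldl stepA ([], false, 0)
  PySem.Str.join " " r.1

-- ===== PORT B =====
def keepB (w : String) : Bool :=
  !(w == "BUTTIGIEG:" || w == "PETE:" || w == "AUDIENCE:" || w == "[applause]")

def filterPete_alt (pete : String) : String :=
  let words := PySem.Str.split₀ pete
  match PySem.List.index? words "BUTTIGIEG:" with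
  | none => ""
  | some idx =>
    let filtered := (words.drop (idx + 1)).filter keepB
    -- chunks = [filtered[i:i+70] for i in range(0, len(filtered), 70)]
    let chunks := (PySem.List.pyRange 0 (filtered.length : Int) 70).map
      (fun i => PySem.List.slice filtered (some i) (some (i + 70)))
    PySem.Str.join " \n " (chunks.map (PySem.Str.join " "))

-- ===== PRECONDITION & SPEC =====
-- When the number of kept words after the first 'BUTTIGIEG:' is a positive multiple of 70,
-- A's 'i % 70 == 0' bookkeeping appends a dangling '\n' list element after the LAST word, so
-- A's output carries an extra trailing ' \n'; B returns the same text without it, the value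
-- intended by breaking the text into lines of 70 words.
def D_filterPete (pete : String) : Prop :=
  let m := ((PySem.Str.split₀ pete).dropWhile (fun w => w != "BUTTIGIEG:")).countP
    (fun w => decide (w ∉ (["BUTTIGIEG:", "PETE:", "AUDIENCE:", "[applause]"] : List String)))
  0 < m ∧ m % 70 = 0
instance (pete : String) : Decidable (D_filterPete pete) := by unfold D_filterPete; infer_instance

def Spec_filterPete (pete : String) (out : String) : Prop := ¬ D_filterPete pete → out = filterPete_alt pete
instance (pete : String) (out : String) : Decidable (Spec_filterPete pete out) := by unfold Spec_filterPete; infer_instance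

def pvDiffWitness_filterPete : String := "BUTTIGIEG: a a a a a a a a a a a a a a a a a a a a a a a a a a a a a a a a a a a a a a a a a a a a a a a a a a a a a a a a a a a a a a a a a a a a a a"
def pvDiffWitnessOut_filterPete : String × String :=
  ("a a a a a a a a a a a a a a a a a a a a a a a a a a a a a a a a a a a a a a a a a a a a a a a a a a a a a a a a a a a a a a a a a a a a a a \n",
   "a a a a a a a a a a a a a a a a a a a a a a a a a a a a a a a a a a a a a a a a a a a a a a a a a a a a a a a a a a a a a a a a a a a a a a")

-- ===== CLAIM (what is proved, stated in full; the proofs are below) =====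
def Claim_unchanged_filterPete : Prop := ∀ (pete : String), Dom_filterPete pete → Spec_filterPete pete (filterPete pete)
def Claim_changed_filterPete : Prop := Dom_filterPete (pvDiffWitness_filterPete) ∧ D_filterPete (pvDiffWitness_filterPete) ∧ filterPete (pvDiffWitness_filterPete) = pvDiffWitnessOut_filterPete.1 ∧ filterPete_alt (pvDiffWitness_filterPete) = pvDiffWitnessOut_filterPete.2 ∧ pvDiffWitnessOut_filterPete.1 ≠ pvDiffWitnessOut_filterPete.2
def Claim_exact_filterPete : Prop := ∀ (pete : String), Dom_filterPete pete → D_filterPete pete → filterPete pete ≠ filterPete_alt pete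

-- ===== LEMMAS AND PROOFS =====

-- spec-side interleaver: each kept word, a '\n' after every 70th (counter wraps)
def weave : Nat → List String → List String
  | _, [] => []
  | k, w :: fs => if k + 1 = 70 then w :: "\n" :: weave 0 fs else w :: weave (k + 1) fs

-- spec-side chunking, structural on a fuel ≥ length
def chunksGo : Nat → List String → List (List String)
  | _, [] => []
  | 0, _ :: _ => []
  | n + 1, w :: fs => (w :: fs).take 70 :: chunksGo n ((w :: fs).drop 70)

theorem chunksGo_congr (n : Nat) : ∀ (m : Nat) (fs : List String),
    fs.length ≤ n → fs.length ≤ m → chunksGo n fs = chunksGo m fs := by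
  induction n with
  | zero =>
    intro m fs hn _
    have : fs = [] := List.eq_nil_of_length_eq_zero (Nat.le_zero.mp hn)
    subst this
    cases m <;> rfl
  | succ n ih =>
    intro m fs hn hm
    cases fs with
    | nil => cases m <;> rfl
    | cons w fs =>
      cases m with
      | zero => simp at hm
      | succ m =>
        simp only [chunksGo]
        congr 1
        apply ih m ((w :: fs).drop 70)
        · simp only [List.length_drop, List.length_cons] at *
          omega
        · simp only [List.length_drop, List.length_cons] at *
          omega

theorem chunksGo_unfold (fs : List String) (h : fs ≠ []) :
    chunksGo fs.length fs = fs.take 70 :: chunksGo (fs.drop 70).length (fs.drop 70) := by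
  cases fs with
  | nil => cases h rfl
  | cons w fs =>
    simp only [List.length_cons, chunksGo]
    congr 1
    apply chunksGo_congr
    · simp only [List.length_drop, List.length_cons]; omega
    · simp only [List.length_drop, List.length_cons]; omega

theorem slice_block (l : List String) (a : Nat) :
    PySem.List.slice l (some ((a : Nat) : Int)) (some (((a : Nat) : Int) + 70)) = (l.drop a).take 70 := by
  have h : ((a : Nat) : Int) + 70 = ((a + 70 : Nat) : Int) := by push_cast; ring
  rw [h, PySem.List.slice_natCast]
  congr 1
  omega

-- B's range/slice comprehension computes exactly the fuel recursion
theorem portChunks_eq (fs : List String) :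
    (PySem.List.pyRange 0 (fs.length : Int) 70).map
      (fun i => PySem.List.slice fs (some i) (some (i + 70)))
    = chunksGo fs.length fs := by
  induction hn : fs.length using Nat.strong_induction_on generalizing fs with
  | _ n ih =>
  subst hn
  by_cases h : fs = []
  · subst h; rfl
  · rw [chunksGo_unfold fs h]
    have hlen : 0 < fs.length := List.length_pos_iff.mpr h
    rw [PySem.List.pyRange_of_pos _ _ (by omega : (0:Int) < 70)]
    have hK : (((fs.length : Int) - 0 + 70 - 1) / 70).toNat = (fs.length + 69) / 70 := by
      omega
    rw [if_pos (by exact_mod_cast hlen), hK]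
    have hK1 : (fs.length + 69) / 70 = ((fs.drop 70).length + 69) / 70 + 1 := by
      simp only [List.length_drop]
      rcases Nat.lt_or_ge fs.length 70 with hc | hc
      · have h1 : (fs.length + 69) / 70 = 1 := by omega
        have h2 : fs.length - 70 = 0 := by omega
        simp [h1, h2]
      · have h2 : fs.length - 70 + 69 + 70 = fs.length + 69 := by omega
        rw [← h2, Nat.add_div_right _ (by omega)]
    rw [hK1, List.range_succ_eq_map]
    simp only [List.map_cons, List.map_map]
    congr 1
    · show PySem.List.slice fs (some ((0:Int) + 70 * (0:Nat))) (some (0 + 70 * (0:Nat) + 70)) = fs.take 70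
      norm_num
      rw [show ((70 : Int) = ((70 : Nat) : Int)) from rfl, PySem.List.slice_to]
      · rfl
      · omega
    · rw [← ih ((fs.drop 70).length) (by simp; omega) (fs.drop 70) rfl]
      rw [PySem.List.pyRange_of_pos _ _ (by omega : (0:Int) < 70)]
      by_cases hd : (fs.drop 70).length = 0
      · simp [hd]
      · rw [if_pos (by exact_mod_cast Nat.pos_of_ne_zero hd)]
        have hK2 : (((fs.drop 70).length : Int) - 0 + 70 - 1) / 70 = (((fs.drop 70).length + 69) / 70 : Nat) := by
          omega
        rw [hK2]
        rw [List.map_map]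
        apply List.map_congr_left
        intro j hj
        simp only [Function.comp]
        have c1 : (0 : Int) + 70 * ((j + 1 : Nat) : Int) = ((70 * (j + 1) : Nat) : Int) := by push_cast; ring
        have c2 : (0 : Int) + 70 * ((j : Nat) : Int) = ((70 * j : Nat) : Int) := by push_cast; ring
        rw [c1, c2, slice_block, slice_block, List.drop_drop]
        congr 2
        omega

theorem join_append_ne (sep : List Char) (xs ys : List (List Char)) (hx : xs ≠ []) (hy : ys ≠ []) :
    PySem.Chars.join sep (xs ++ ys) = PySem.Chars.join sep xs ++ sep ++ PySem.Chars.join sep ys := by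
  induction xs with
  | nil => cases hx rfl
  | cons a xs ih =>
    cases xs with
    | nil =>
      cases ys with
      | nil => cases hy rfl
      | cons b ys => simp [PySem.Chars.join_singleton, PySem.Chars.join_cons_cons]
    | cons c xs' =>
      have ih' := ih (by simp)
      simp only [List.cons_append] at ih' ⊢
      rw [PySem.Chars.join_cons_cons sep a c (xs' ++ ys),
        PySem.Chars.join_cons_cons sep a c xs', ih']
      simp [List.append_assoc]

theorem weave_ne_nil (k : Nat) (w : String) (fs : List String) : weave k (w :: fs) ≠ [] := by
  unfold weave; split <;> simp

-- before the tag appears, A's loop does nothing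
theorem foldl_stepA_not_started (ws : List String) (f : List String) (i : Int)
    (h : "BUTTIGIEG:" ∉ ws) :
    ws.foldl stepA (f, false, i) = (f, false, i) := by
  induction ws with
  | nil => rfl
  | cons w ws ih =>
    have hw : w ≠ "BUTTIGIEG:" := by intro e; exact h (by simp [e])
    simp only [List.foldl_cons, stepA, hw, if_false]
    simp only [Bool.false_eq_true, if_false]
    exact ih (fun m => h (List.mem_cons_of_mem _ m))

-- after the tag, A's loop appends exactly weave of the kept words
theorem foldl_stepA_started (ws : List String) (f : List String) (i : Int)
    (hi : 0 ≤ i) :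
    (ws.foldl stepA (f, true, i)).1 = f ++ weave ((i % 70).toNat) (ws.filter keepB) := by
  induction ws generalizing f i with
  | nil => simp [weave]
  | cons w ws ih =>
    by_cases hb : w = "BUTTIGIEG:"
    · subst hb
      simp only [List.foldl_cons, stepA, List.filter_cons, keepB]
      simpa using ih f i hi
    · by_cases hk : w ≠ "PETE:" ∧ w ≠ "AUDIENCE:" ∧ w ≠ "[applause]"
      · have hkb : keepB w = true := by simp [keepB, hb, hk.1, hk.2.1, hk.2.2]
        have hm : PySem.Int.mod (i + 1) 70 = (i + 1) % 70 :=
          PySem.Int.mod_eq_emod_of_pos (by omega)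
        have hb1 : (0:Int) ≤ i % 70 := Int.emod_nonneg i (by omega)
        have hb2 : i % 70 < 70 := Int.emod_lt_of_pos i (by omega)
        have hstep : (i + 1) % 70 = if i % 70 = 69 then 0 else i % 70 + 1 := by
          have := Int.emod_emod_of_dvd (i + 1) (dvd_refl (70:Int))
          omega
        simp only [List.foldl_cons, stepA, if_neg hb, if_pos hk, List.filter_cons, hkb, if_true]
        by_cases h69 : i % 70 = 69
        · have hz : PySem.Int.mod (i + 1) 70 = 0 := by rw [hm, hstep]; simp [h69]
          rw [if_pos hz]
          rw [ih (f ++ [w] ++ ["\n"]) (i + 1) (by omega)]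
          have h0 : ((i + 1) % 70).toNat = 0 := by rw [hstep]; simp [h69]
          have ht : (i % 70).toNat = 69 := by omega
          rw [h0, ht]
          simp [weave]
        · have hz : ¬ PySem.Int.mod (i + 1) 70 = 0 := by rw [hm, hstep]; simp [h69]; omega
          rw [if_neg hz]
          rw [ih (f ++ [w]) (i + 1) (by omega)]
          have h0 : ((i + 1) % 70).toNat = (i % 70).toNat + 1 := by rw [hstep]; simp [h69]; omega
          rw [h0]
          have hk70 : ¬ ((i % 70).toNat + 1 = 70) := by omega
          simp [weave, hk70]
      · have hkb : keepB w = false := by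
          simp only [keepB]
          simp only [not_and_or, not_not] at hk
          rcases hk with h | h | h <;> simp [h]
        simp only [List.foldl_cons, stepA, if_neg hb, if_neg hk, List.filter_cons, hkb,
          Bool.false_eq_true, if_false]
        exact ih f i hi

-- weave with counter k emits the next 70 - k words, then a newline and restarts
theorem weave_split (fs : List String) : ∀ (k : Nat), k < 70 →
    weave k fs = fs.take (70 - k) ++
      (if 70 - k ≤ fs.length then "\n" :: weave 0 (fs.drop (70 - k)) else []) := by
  induction fs with
  | nil => intro k hk; simp [weave]; omega
  | cons w fs ih =>
    intro k hk
    by_cases h69 : k = 69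
    · subst h69
      simp [weave]
    · have hk1 : k + 1 < 70 := by omega
      have h1 : 70 - k = (70 - (k + 1)) + 1 := by omega
      simp only [weave, if_neg (by omega : ¬ k + 1 = 70)]
      rw [ih (k + 1) hk1, h1]
      simp only [List.take_succ_cons, List.drop_succ_cons, List.length_cons, List.cons_append]
      congr 1
      by_cases hle : 70 - (k + 1) ≤ fs.length
      · rw [if_pos hle, if_pos (by omega)]
      · rw [if_neg hle, if_neg (by omega)]

-- the heart: the space-join of A's weave is B's chunk-join, plus ' \n' exactly when 70 ∣ len
theorem join_weave_eq (fs : List String) : fs ≠ [] →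
    PySem.Chars.join (" ".toList) ((weave 0 fs).map String.toList) =
      PySem.Chars.join (" \n ".toList)
        (((chunksGo fs.length fs).map (PySem.Str.join " ")).map String.toList)
      ++ (if fs.length % 70 = 0 then [' ', '\n'] else []) := by
  induction hn : fs.length using Nat.strong_induction_on generalizing fs with
  | _ n ih =>
  subst hn
  intro hne
  rw [weave_split fs 0 (by omega)]
  simp only [Nat.sub_zero]
  rw [chunksGo_unfold fs hne]
  have htne : fs.take 70 ≠ [] := by
    intro h
    apply hne
    have h0 := congrArg List.length h
    simp only [List.length_take, List.length_nil] at h0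
    exact List.eq_nil_of_length_eq_zero (by omega)
  have hmapne : (fs.take 70).map String.toList ≠ [] := fun h => htne (by simpa using h)
  by_cases h70 : 70 ≤ fs.length
  · rw [if_pos h70]
    by_cases hgt : 70 < fs.length
    · have hdne : fs.drop 70 ≠ [] := by
        intro h
        have := congrArg List.length h
        simp at this
        omega
      obtain ⟨w, rest, hw⟩ : ∃ w rest, fs.drop 70 = w :: rest := by
        cases hd : fs.drop 70 with
        | nil => exact absurd hd hdne
        | cons a b => exact ⟨a, b, rfl⟩
      have hwne : weave 0 (fs.drop 70) ≠ [] := by rw [hw]; exact weave_ne_nil 0 w rest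
      obtain ⟨v, vrest, hv⟩ : ∃ v vrest, weave 0 (fs.drop 70) = v :: vrest := by
        cases hd : weave 0 (fs.drop 70) with
        | nil => exact absurd hd hwne
        | cons a b => exact ⟨a, b, rfl⟩
      -- LHS
      rw [List.map_append, join_append_ne _ _ _ hmapne (by simp)]
      rw [List.map_cons, hv, List.map_cons, PySem.Chars.join_cons_cons]
      -- RHS chunk list is take :: (nonempty chunks of drop)
      have hcne : chunksGo (fs.drop 70).length (fs.drop 70) ≠ [] := by
        rw [chunksGo_unfold _ hdne]; simp
      obtain ⟨c, crest, hc⟩ : ∃ c crest, chunksGo (fs.drop 70).length (fs.drop 70) = c :: crest := by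
        cases hd : chunksGo (fs.drop 70).length (fs.drop 70) with
        | nil => exact absurd hd hcne
        | cons a b => exact ⟨a, b, rfl⟩
      rw [hc]
      simp only [List.map_cons, PySem.Chars.join_cons_cons]
      have hihd := ih (fs.drop 70).length (by simp; omega) (fs.drop 70) rfl hdne
      rw [hv, hc] at hihd
      simp only [List.map_cons] at hihd
      rw [hihd]
      have hmod : fs.length % 70 = (fs.drop 70).length % 70 := by
        simp only [List.length_drop]
        omega
      rw [hmod, PySem.Str.toList_join]
      have h1 : ("\n" : String).toList = ['\n'] := by decide
      have h2 : (" " : String).toList = [' '] := by decide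
      have h3 : (" \n " : String).toList = [' ', '\n', ' '] := by decide
      rw [h1, h2, h3]
      simp [List.append_assoc]
    · -- fs.length = 70 exactly
      have hlen : fs.length = 70 := by omega
      have hdrop : fs.drop 70 = [] := List.drop_eq_nil_of_le (by omega)
      rw [hdrop]
      simp only [weave, List.map_append, List.map_cons, List.map_nil]
      rw [join_append_ne _ _ _ hmapne (by simp)]
      rw [PySem.Chars.join_singleton]
      show _ = PySem.Chars.join _ [(PySem.Str.join " " (fs.take 70)).toList] ++ _
      rw [PySem.Chars.join_singleton, PySem.Str.toList_join]
      have h1 : ("\n" : String).toList = ['\n'] := by decide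
      rw [h1, if_pos (by omega)]
      simp [List.append_assoc]
  · -- fewer than 70 words: one chunk, no newline
    rw [if_neg h70]
    have htake : fs.take 70 = fs := List.take_of_length_le (by omega)
    have hdrop : fs.drop 70 = [] := List.drop_eq_nil_of_le (by omega)
    rw [hdrop, htake]
    show _ = PySem.Chars.join _ [(PySem.Str.join " " fs).toList] ++ _
    rw [PySem.Chars.join_singleton, PySem.Str.toList_join]
    have hmod : ¬ fs.length % 70 = 0 := by
      have : 0 < fs.length := List.length_pos_iff.mpr hne
      omega
    simp [hmod]

theorem dropWhile_tag (pre suf : List String) (h : "BUTTIGIEG:" ∉ pre) :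
    (pre ++ "BUTTIGIEG:" :: suf).dropWhile (fun w => w != "BUTTIGIEG:") = "BUTTIGIEG:" :: suf := by
  induction pre with
  | nil => simp
  | cons p ps ih =>
    have hp : p ≠ "BUTTIGIEG:" := fun e => h (by simp [e])
    simp only [List.cons_append, List.dropWhile_cons]
    rw [if_pos (by simp [hp])]
    exact ih (fun m => h (List.mem_cons_of_mem _ m))

-- both claims' common unfolding: with the tag at index k, A is the weave-join and B the chunk-join
theorem AB_forms (pete : String) (k : Nat)
    (hidx : PySem.List.index? (PySem.Str.split₀ pete) "BUTTIGIEG:" = some k) :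
    ∃ fs : List String,
      ((PySem.Str.split₀ pete).drop (k + 1)).filter keepB = fs ∧
      filterPete pete = PySem.Str.join " " (weave 0 fs) ∧
      filterPete_alt pete = PySem.Str.join " \n "
        ((chunksGo fs.length fs).map (PySem.Str.join " ")) ∧
      (D_filterPete pete ↔ (0 < fs.length ∧ fs.length % 70 = 0)) := by
  obtain ⟨pre, suf, hsplit, hlen, hnotin⟩ :=
    (PySem.List.index?_eq_some_iff _ _ _).1 hidx
  have hdrop : ((PySem.Str.split₀ pete).drop (k + 1)) = suf := by
    rw [hsplit, ← hlen]
    simp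
  refine ⟨suf.filter keepB, by rw [hdrop], ?_, ?_, ?_⟩
  · show (PySem.Str.join " " ((PySem.Str.split₀ pete).foldl stepA ([], false, 0)).1) = _
    rw [hsplit, List.foldl_append, foldl_stepA_not_started pre [] 0 hnotin]
    simp only [List.foldl_cons, stepA, if_true]
    rw [foldl_stepA_started suf [] 0 (le_refl 0)]
    norm_num
  · simp only [filterPete_alt, hidx, hdrop]
    rw [portChunks_eq]
  · have hdw : (PySem.Str.split₀ pete).dropWhile (fun w => w != "BUTTIGIEG:")
        = "BUTTIGIEG:" :: suf := by
      rw [hsplit]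
      exact dropWhile_tag pre suf hnotin
    simp only [D_filterPete, hdw]
    rw [List.countP_cons]
    simp only [decide_eq_true_eq]
    rw [if_neg (by simp)]
    rw [List.countP_eq_length_filter, Nat.add_zero]
    have hfe : suf.filter (fun w => decide (w ∉ (["BUTTIGIEG:", "PETE:", "AUDIENCE:", "[applause]"] : List String)))
        = suf.filter keepB := by
      apply List.filter_congr
      intro w _
      by_cases h1 : w = "BUTTIGIEG:" <;> by_cases h2 : w = "PETE:" <;>
        by_cases h3 : w = "AUDIENCE:" <;> by_cases h4 : w = "[applause]" <;>
        simp [keepB, h1, h2, h3, h4]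
    rw [hfe]

-- ===== VERDICT (by name: the statement is the Claim_ definition above) =====
theorem filterPete_spec : Claim_unchanged_filterPete := by
  intro pete _ hD
  cases hidx : PySem.List.index? (PySem.Str.split₀ pete) "BUTTIGIEG:" with
  | none =>
    have hnm : "BUTTIGIEG:" ∉ PySem.Str.split₀ pete :=
      (PySem.List.index?_eq_none_iff _ _).1 hidx
    simp only [filterPete, filterPete_alt, hidx, foldl_stepA_not_started _ _ _ hnm]
    decide
  | some k =>
    obtain ⟨fs, _, hA, hB, hDm⟩ := AB_forms pete k hidx
    rw [hA, hB]
    by_cases hfs : fs = []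
    · subst hfs; decide
    · have hmod : ¬ fs.length % 70 = 0 := by
        intro h
        exact hD (hDm.mpr ⟨List.length_pos_iff.mpr hfs, h⟩)
      apply String.toList_inj.mp
      rw [PySem.Str.toList_join, PySem.Str.toList_join]
      rw [join_weave_eq fs hfs, if_neg hmod]
      simp

set_option maxRecDepth 100000 in
theorem filterPete_changed : Claim_changed_filterPete := by
  unfold Claim_changed_filterPete
  decide

theorem filterPete_tight : Claim_exact_filterPete := by
  intro pete _ hD
  cases hidx : PySem.List.index? (PySem.Str.split₀ pete) "BUTTIGIEG:" with
  | none =>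
    exfalso
    have hnm : "BUTTIGIEG:" ∉ PySem.Str.split₀ pete :=
      (PySem.List.index?_eq_none_iff _ _).1 hidx
    have hdw : (PySem.Str.split₀ pete).dropWhile (fun w => w != "BUTTIGIEG:") = [] := by
      rw [List.dropWhile_eq_nil_iff]
      intro x hx
      simp only [bne_iff_ne, ne_eq]
      exact fun e => hnm (e ▸ hx)
    simp only [D_filterPete, hdw] at hD
    simp at hD
  | some k =>
    obtain ⟨fs, _, hA, hB, hDm⟩ := AB_forms pete k hidx
    obtain ⟨hpos, hmod⟩ := hDm.mp hD
    have hfs : fs ≠ [] := by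
      intro h; subst h; simp at hpos
    rw [hA, hB]
    intro h
    have := congrArg String.toList h
    rw [PySem.Str.toList_join, PySem.Str.toList_join] at this
    rw [join_weave_eq fs hfs, if_pos hmod] at this
    simp at this
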